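-- pv_equiv track=rewrite | github.com/becxwns/operations-research-lab-works | Scheduling/Single Machine/Filtering Local Search.py | neighbors_lblock_forward
-- ===== SOURCE A (Python) =====
-- def neighbors_lblock_forward(order, l):
--     # (i, j): [i..i+l-1] 블록을 j 직후에 삽입 (i < j)
--     n = len(order)
--     for i in range(0, n - l):
--         for j in range(i + l, n):
--             blk = order[i:i+l]
--             rest = order[:i] + order[i+l:]
--             new_order = rest[:j - l + 1] + blk + rest[j - l + 1:]
--             yield ("lF", i, j, l, new_order)
-- ===== SOURCE B (Python) =====
-- def neighbors_lblock_forward(order, l):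
--     # Keeps one evolving list per i: each step moves the element at index j
--     # back to position j-l, advancing the block one slot, instead of
--     # rebuilding every neighbor from slices.
--     n = len(order)
--     for i in range(0, n - l):
--         cur = list(order)
--         for j in range(i + l, n):
--             x = cur.pop(j)
--             cur.insert(j - l, x)
--             yield ("lF", i, j, l, list(cur))
-- ===== Notes on version B (the rewrite author's own statement) =====
-- stated objective: alternative
-- what changed: Instead of rebuilding each neighbor from four slice concatenations per (i,j), B keeps one evolving list per i and advances the block one slot per j by a single pop/insert move, yielding a copy each step.
-- outside the precondition, e.g. on neighbors_lblock_forward([], -1): A returns [('lF', 0, -1, -1, [])], B raises IndexError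
import Mathlib
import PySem

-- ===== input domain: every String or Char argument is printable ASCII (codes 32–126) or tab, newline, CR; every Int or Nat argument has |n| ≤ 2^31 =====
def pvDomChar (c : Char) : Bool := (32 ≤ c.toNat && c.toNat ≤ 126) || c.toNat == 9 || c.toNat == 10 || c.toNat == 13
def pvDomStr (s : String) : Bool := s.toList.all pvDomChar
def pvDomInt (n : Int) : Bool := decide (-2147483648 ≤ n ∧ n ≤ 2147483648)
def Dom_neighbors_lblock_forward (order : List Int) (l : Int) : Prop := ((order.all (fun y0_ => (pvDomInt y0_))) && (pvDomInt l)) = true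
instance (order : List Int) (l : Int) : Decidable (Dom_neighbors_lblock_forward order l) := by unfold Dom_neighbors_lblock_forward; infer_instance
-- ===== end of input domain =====

-- B replaces the per-(i,j) slice reconstruction by one evolving list per i,
-- advanced one slot per j with a single pop/insert move (objective: alternative).

-- ===== PORT A =====
def neighbors_lblock_forward (order : List Int) (l : Int) : List (String × Int × Int × Int × List Int) :=
  let n : Int := order.length
  (PySem.List.pyRange 0 (n - l) 1).foldl (fun acc i =>
    (PySem.List.pyRange (i + l) n 1).foldl (fun acc j =>
      let blk := PySem.List.slice order (some i) (some (i + l))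
      let rest := PySem.List.slice order none (some i) ++ PySem.List.slice order (some (i + l)) none
      let new_order := PySem.List.slice rest none (some (j - l + 1)) ++ blk ++
        PySem.List.slice rest (some (j - l + 1)) none
      acc ++ [("lF", i, j, l, new_order)]) acc) []

-- ===== PORT B =====
def neighbors_lblock_forward_alt (order : List Int) (l : Int) : List (String × Int × Int × Int × List Int) :=
  let n : Int := order.length
  (PySem.List.pyRange 0 (n - l) 1).foldl (fun acc i =>
    ((PySem.List.pyRange (i + l) n 1).foldl
      (fun (st : List (String × Int × Int × Int × List Int) × List Int) j =>
        match PySem.List.pop? st.2 j with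
        | some (x, cur') =>
          let cur2 := PySem.List.insert cur' (j - l) x
          (st.1 ++ [("lF", i, j, l, cur2)], cur2)
        | none => st)   -- IndexError in Python B; unreachable under Pre_ (0 ≤ l)
      (acc, order)).1) []

-- ===== PRECONDITION & SPEC =====
-- Pre_ excludes negative l, on which A still returns: a negative block length is
-- meaningless for this neighborhood, A's yields there are accidents of Python's
-- negative-slice wraparound, and B's index-based moves raise IndexError or wrap
-- differently there.
def Pre_neighbors_lblock_forward (order : List Int) (l : Int) : Prop := 0 ≤ l
instance (order : List Int) (l : Int) : Decidable (Pre_neighbors_lblock_forward order l) := by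
  unfold Pre_neighbors_lblock_forward; infer_instance

def pvWitness_neighbors_lblock_forward : List Int × Int := ([3, 1, 4, 1], 2)

def Spec_neighbors_lblock_forward (order : List Int) (l : Int) (out : List (String × Int × Int × Int × List Int)) : Prop := out = neighbors_lblock_forward_alt order l
instance (order : List Int) (l : Int) (out : List (String × Int × Int × Int × List Int)) : Decidable (Spec_neighbors_lblock_forward order l out) := by unfold Spec_neighbors_lblock_forward; infer_instance

-- ===== CLAIM (what is proved, stated in full; the proofs are below) =====
def Claim_equal_neighbors_lblock_forward : Prop := ∀ (order : List Int) (l : Int), Dom_neighbors_lblock_forward order l → Pre_neighbors_lblock_forward order l → Spec_neighbors_lblock_forward order l (neighbors_lblock_forward order l)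

-- ===== LEMMAS AND PROOFS =====

-- fixed pieces of the i-th round, in Nat take/drop form
def pvBlk (order : List Int) (i l : Int) : List Int := (order.drop i.toNat).take l.toNat
def pvRest (order : List Int) (i l : Int) : List Int :=
  order.take i.toNat ++ order.drop (i.toNat + l.toNat)

-- the inner loop of each port, named for the induction
def pvInnerA (order : List Int) (l i : Int)
    (acc : List (String × Int × Int × Int × List Int)) (j : Int) :
    List (String × Int × Int × Int × List Int) :=
  (PySem.List.pyRange j (order.length : Int) 1).foldl (fun acc j =>
    let blk := PySem.List.slice order (some i) (some (i + l))
    let rest := PySem.List.slice order none (some i) ++ PySem.List.slice order (some (i + l)) none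
    let new_order := PySem.List.slice rest none (some (j - l + 1)) ++ blk ++
      PySem.List.slice rest (some (j - l + 1)) none
    acc ++ [("lF", i, j, l, new_order)]) acc

def pvInnerB (order : List Int) (l i : Int)
    (st : List (String × Int × Int × Int × List Int) × List Int) (j : Int) :
    List (String × Int × Int × Int × List Int) × List Int :=
  (PySem.List.pyRange j (order.length : Int) 1).foldl
    (fun st j =>
      match PySem.List.pop? st.2 j with
      | some (x, cur') =>
        let cur2 := PySem.List.insert cur' (j - l) x
        (st.1 ++ [("lF", i, j, l, cur2)], cur2)
      | none => st) st

lemma pv_pop (rest blk : List Int) (K : Nat) (hK : K < rest.length) :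
    PySem.List.pop? (rest.take K ++ blk ++ rest.drop K) (((K + blk.length : Nat) : Int))
      = some (rest[K], rest.take K ++ blk ++ rest.drop (K + 1)) := by
  have hlen : (rest.take K ++ blk ++ rest.drop K).length = rest.length + blk.length := by
    simp; omega
  rw [PySem.List.pop?_natCast _ (K + blk.length) (by simp; omega)]
  have hfst : (rest.take K ++ blk).length ≤ K + blk.length := by simp
  have e0 : K + blk.length - (rest.take K ++ blk).length = 0 := by simp; omega
  have h1 : (rest.take K ++ blk ++ rest.drop K)[K + blk.length]'(by simp; try omega)
      = rest[K] := by
    rw [List.getElem_append_right hfst]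
    simp only [List.getElem_drop]
    congr 1
    simp
    omega
  have h2 : (rest.take K ++ blk ++ rest.drop K).eraseIdx (K + blk.length)
      = rest.take K ++ blk ++ rest.drop (K + 1) := by
    rw [List.eraseIdx_append_of_length_le (by simp; try omega), e0]
    simp [List.eraseIdx_zero, List.tail_drop]
  rw [h1, h2]

lemma pv_insert (rest blk : List Int) (K : Nat) (hK : K < rest.length) :
    PySem.List.insert (rest.take K ++ blk ++ rest.drop (K + 1)) ((K : Nat) : Int)
        (rest[K]'hK)
      = rest.take (K + 1) ++ blk ++ rest.drop (K + 1) := by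
  rw [PySem.List.insert_natCast _ K _ (by simp; omega)]
  have ht : (rest.take K ++ blk ++ rest.drop (K + 1)).take K = rest.take K := by
    rw [List.append_assoc, List.take_append_of_le_length (by simp; omega)]
    simp
  have hd : (rest.take K ++ blk ++ rest.drop (K + 1)).drop K = blk ++ rest.drop (K + 1) := by
    rw [List.append_assoc, List.drop_left' (by simp; omega)]
  rw [ht, hd]
  rw [show rest[K]'hK :: (blk ++ rest.drop (K + 1))
      = [rest[K]'hK] ++ (blk ++ rest.drop (K + 1)) from rfl]
  rw [← List.append_assoc, List.take_append_getElem, List.append_assoc]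

lemma pv_init (order : List Int) (l i : Int) (hl : 0 ≤ l) (hi : 0 ≤ i)
    (hin : i + l ≤ (order.length : Int)) :
    order = (pvRest order i l).take i.toNat ++ pvBlk order i l ++
      (pvRest order i l).drop i.toNat := by
  have hIN : i.toNat + l.toNat ≤ order.length := by omega
  have ht : (pvRest order i l).take i.toNat = order.take i.toNat := by
    unfold pvRest
    rw [List.take_append_of_le_length (by simp; omega)]
    simp
  have hd : (pvRest order i l).drop i.toNat = order.drop (i.toNat + l.toNat) := by
    unfold pvRest
    rw [List.drop_left' (by simp; omega)]
  rw [ht, hd]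
  unfold pvBlk
  rw [← List.drop_drop]
  rw [List.append_assoc, List.take_append_drop, List.take_append_drop]

lemma pv_inner_eq (order : List Int) (l i : Int) (hl : 0 ≤ l) (hi : 0 ≤ i)
    (hin : i + l ≤ (order.length : Int)) :
    ∀ (m : Nat) (j : Int) (acc : List (String × Int × Int × Int × List Int)) (cur : List Int),
      i + l ≤ j → m = ((order.length : Int) - j).toNat →
      cur = (pvRest order i l).take (j - l).toNat ++ pvBlk order i l ++
        (pvRest order i l).drop (j - l).toNat →
      (pvInnerB order l i (acc, cur) j).1 = pvInnerA order l i acc j := by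
  have hIN : i.toNat + l.toNat ≤ order.length := by omega
  have hrestlen : (pvRest order i l).length = order.length - l.toNat := by
    unfold pvRest; simp; omega
  have hblklen : (pvBlk order i l).length = l.toNat := by
    unfold pvBlk; simp; omega
  intro m
  induction m with
  | zero =>
    intro j acc cur hj hm hcur
    unfold pvInnerA pvInnerB
    rw [PySem.List.pyRange_one_eq_nil (by omega)]
    simp
  | succ m ih =>
    intro j acc cur hj hm hcur
    have hjn : j < (order.length : Int) := by omega
    have h0j : 0 ≤ j - l := by omega
    set K := (j - l).toNat with hKdef
    have hKlt : K < (pvRest order i l).length := by rw [hrestlen]; omega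
    have hjK : j = ((K + (pvBlk order i l).length : Nat) : Int) := by
      rw [hblklen]; omega
    have hjl : j - l = ((K : Nat) : Int) := by omega
    unfold pvInnerA pvInnerB
    rw [PySem.List.pyRange_one_cons hjn]
    simp only [List.foldl_cons]
    -- B's step
    have hpop : PySem.List.pop? cur j
        = some ((pvRest order i l)[K]'hKlt,
            (pvRest order i l).take K ++ pvBlk order i l ++ (pvRest order i l).drop (K + 1)) := by
      rw [hcur, hjK]
      exact pv_pop _ _ _ hKlt
    rw [hpop]
    simp only []
    rw [hjl, pv_insert _ _ _ hKlt]
    -- A's step: the slice expression is the same list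
    have hblk : PySem.List.slice order (some i) (some (i + l)) = pvBlk order i l := by
      rw [PySem.List.slice_toNat order hi (by omega)]
      unfold pvBlk
      congr 1
      omega
    have hrest : PySem.List.slice order none (some i) ++ PySem.List.slice order (some (i + l)) none
        = pvRest order i l := by
      rw [PySem.List.slice_to order hi, PySem.List.slice_from order (by omega)]
      unfold pvRest
      congr 2
      omega
    have hnew1 : PySem.List.slice (pvRest order i l) none (some ((K : Int) + 1))
        = (pvRest order i l).take (K + 1) := by
      rw [PySem.List.slice_to _ (by omega)]
      have e : ((K : Int) + 1).toNat = K + 1 := by omega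
      rw [e]
    have hnew2 : PySem.List.slice (pvRest order i l) (some ((K : Int) + 1)) none
        = (pvRest order i l).drop (K + 1) := by
      rw [PySem.List.slice_from _ (by omega)]
      have e : ((K : Int) + 1).toNat = K + 1 := by omega
      rw [e]
    have hno : PySem.List.slice
          (PySem.List.slice order none (some i) ++ PySem.List.slice order (some (i + l)) none)
          none (some ((K : Int) + 1)) ++
        PySem.List.slice order (some i) (some (i + l)) ++
        PySem.List.slice
          (PySem.List.slice order none (some i) ++ PySem.List.slice order (some (i + l)) none)
          (some ((K : Int) + 1)) none
        = (pvRest order i l).take (K + 1) ++ pvBlk order i l ++ (pvRest order i l).drop (K + 1) := by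
      rw [hrest, hblk, hnew1, hnew2]
    rw [hno]
    -- recurse
    have hm' : m = ((order.length : Int) - (j + 1)).toNat := by omega
    have hK' : (j + 1 - l).toNat = K + 1 := by omega
    have := ih (j + 1) (acc ++ [("lF", i, j, l,
        (pvRest order i l).take (K + 1) ++ pvBlk order i l ++ (pvRest order i l).drop (K + 1))])
      ((pvRest order i l).take (K + 1) ++ pvBlk order i l ++ (pvRest order i l).drop (K + 1))
      (by omega) hm' (by rw [hK'])
    unfold pvInnerA pvInnerB at this
    exact this

-- ===== VERDICT (by name: the statement is the Claim_ definition above) =====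
theorem neighbors_lblock_forward_spec : Claim_equal_neighbors_lblock_forward := by
  intro order l hdom hl
  unfold Spec_neighbors_lblock_forward
  simp only [neighbors_lblock_forward, neighbors_lblock_forward_alt]
  refine (PySem.List.foldl_congr_mem _ _ _ _ ?_).symm
  intro acc i hmem
  obtain ⟨hi0, hilt⟩ := (PySem.List.mem_pyRange_one).1 hmem
  have hil : i + l ≤ (order.length : Int) := by omega
  have hinit := pv_init order l i hl hi0 hil
  have h := pv_inner_eq order l i hl hi0 hil (((order.length : Int) - (i + l)).toNat)
    (i + l) acc order (le_refl _) rfl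
    (by rw [show ((i + l) - l) = i from by ring]; exact hinit)
  exact h
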